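-- pv_equiv track=rewrite | github.com/Go0day/ToolRec-Code | utils.py | cleaning_user_itemList
-- ===== SOURCE A (Python) =====
-- def cleaning_user_itemList(ui_dict, topk=10):
--     larger_than = 0
--     smaller_than = 0
--     uid_list = [u for u in ui_dict.keys()]
--     for uid in uid_list:
--         if len(ui_dict[uid]) == 10:
--             continue
--         elif len(ui_dict[uid]) > 10:
--             larger_than += 1
--             ui_dict[uid] = ui_dict[uid][:10]
--         elif len(ui_dict[uid]) < 10:
--             smaller_than += 1
--             del ui_dict[uid]
--     return ui_dict, larger_than, smaller_than
-- ===== SOURCE B (Python) =====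
-- def cleaning_user_itemList(ui_dict, topk=10):
--     too_long = [u for u in list(ui_dict) if len(ui_dict[u]) > 10]
--     too_short = [u for u in list(ui_dict) if len(ui_dict[u]) < 10]
--     for u in too_long:
--         ui_dict[u] = ui_dict[u][:10]
--     for u in too_short:
--         del ui_dict[u]
--     return ui_dict, len(too_long), len(too_short)
-- ===== Notes on version B (the rewrite author's own statement) =====
-- stated objective: alternative
-- what changed: Replaces A's single interleaved scan that mutates (truncate/delete) while counting with a build-index-then-apply structure: two key-index passes collect too_long and too_short, then one pass truncates, a separate pass deletes, and the counts are the index lengths.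
import Mathlib
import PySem

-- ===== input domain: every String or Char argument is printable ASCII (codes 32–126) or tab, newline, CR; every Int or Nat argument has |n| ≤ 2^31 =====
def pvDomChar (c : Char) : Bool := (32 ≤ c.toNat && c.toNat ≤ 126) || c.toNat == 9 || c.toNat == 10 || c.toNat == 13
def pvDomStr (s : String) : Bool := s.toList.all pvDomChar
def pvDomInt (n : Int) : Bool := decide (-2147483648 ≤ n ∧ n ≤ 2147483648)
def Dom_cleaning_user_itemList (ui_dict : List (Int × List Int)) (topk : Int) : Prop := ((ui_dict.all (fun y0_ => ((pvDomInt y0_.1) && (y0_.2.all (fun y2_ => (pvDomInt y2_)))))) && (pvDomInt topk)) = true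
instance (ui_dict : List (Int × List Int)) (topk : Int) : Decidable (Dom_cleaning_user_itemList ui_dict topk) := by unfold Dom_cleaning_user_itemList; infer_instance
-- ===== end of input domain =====

-- B replaces A's single interleaved mutate-while-counting pass by a build-index-then-apply
-- decomposition (two key-index passes, then a truncate pass and a delete pass); same cost.
-- Both A and B mutate the passed-in dict in place and return it; the equivalence proved here
-- is about the returned value, and both perform the same net mutation.


-- ===== PORT A =====
-- loop body of A: read ui_dict[uid] (uid is a still-present key, so getD's default is never
-- used), then continue / truncate-and-count / delete-and-count.  v[:10] = v.take 10 (exact).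
def pvStepA (st : PySem.Dict Int (List Int) × Int × Int) (uid : Int) :
    PySem.Dict Int (List Int) × Int × Int :=
  let v := st.1.getD uid []
  if v.length = 10 then st
  else if 10 < v.length then (st.1.insert uid (v.take 10), st.2.1 + 1, st.2.2)
  else (st.1.erase uid, st.2.1, st.2.2 + 1)

def cleaning_user_itemList (ui_dict : List (Int × List Int)) (topk : Int) :
    (List (Int × List Int)) × Int × Int :=
  let d := PySem.Dict.ofList ui_dict
  let uid_list := d.keys
  let r := uid_list.foldl pvStepA (d, 0, 0)
  (r.1.items, r.2.1, r.2.2)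

-- ===== PORT B =====
def cleaning_user_itemList_alt (ui_dict : List (Int × List Int)) (topk : Int) :
    (List (Int × List Int)) × Int × Int :=
  let d := PySem.Dict.ofList ui_dict
  let too_long := d.keys.filter (fun u => decide (10 < (d.getD u []).length))
  let too_short := d.keys.filter (fun u => decide ((d.getD u []).length < 10))
  let d1 := too_long.foldl (fun d' u => d'.insert u ((d'.getD u []).take 10)) d
  let d2 := too_short.foldl (fun d' u => d'.erase u) d1
  (d2.items, (too_long.length : Int), (too_short.length : Int))

-- ===== PRECONDITION & SPEC =====
def Spec_cleaning_user_itemList (ui_dict : List (Int × List Int)) (topk : Int) (out : (List (Int × List Int)) × Int × Int) : Prop := out = cleaning_user_itemList_alt ui_dict topk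
instance (ui_dict : List (Int × List Int)) (topk : Int) (out : (List (Int × List Int)) × Int × Int) : Decidable (Spec_cleaning_user_itemList ui_dict topk out) := by unfold Spec_cleaning_user_itemList; infer_instance

-- ===== CLAIM (what is proved, stated in full; the proofs are below) =====
def Claim_equal_cleaning_user_itemList : Prop := ∀ (ui_dict : List (Int × List Int)) (topk : Int), Dom_cleaning_user_itemList ui_dict topk → Spec_cleaning_user_itemList ui_dict topk (cleaning_user_itemList ui_dict topk)

-- ===== LEMMAS AND PROOFS =====

-- the net effect of both programs on one surviving entry: truncate if too long
def pvG (p : Int × List Int) : Int × List Int :=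
  if 10 < p.2.length then (p.1, p.2.take 10) else p

theorem pv_find_skip (done : List (Int × List Int)) (u : Int)
    (h : u ∉ done.map Prod.fst) (l : List (Int × List Int)) :
    (done ++ l).find? (fun p => p.1 == u) = l.find? (fun p => p.1 == u) := by
  induction done with
  | nil => rfl
  | cons q qs ih =>
      simp only [List.map_cons, List.mem_cons] at h
      push_neg at h
      have hb : (q.1 == u) = false := by
        simp only [beq_eq_false_iff_ne, ne_eq]
        exact fun e => h.1 e.symm
      simp only [List.cons_append, List.find?_cons, hb]
      exact ih h.2

theorem pv_getD_mid (done rest : List (Int × List Int)) (u : Int) (v : List Int)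
    (h : u ∉ done.map Prod.fst) :
    (PySem.Dict.mk (done ++ (u, v) :: rest)).getD u [] = v := by
  simp only [PySem.Dict.getD, PySem.Dict.get?]
  rw [pv_find_skip done u h]
  simp

theorem pv_map_keep (u : Int) (w : List Int) (L : List (Int × List Int))
    (hL : u ∉ L.map Prod.fst) :
    L.map (fun p => if p.1 == u then (u, w) else p) = L := by
  induction L with
  | nil => rfl
  | cons q qs ih =>
      simp only [List.map_cons, List.mem_cons] at hL
      push_neg at hL
      have hb : (q.1 == u) = false := by
        simp only [beq_eq_false_iff_ne, ne_eq]
        exact fun e => hL.1 e.symm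
      simp only [List.map_cons, hb, Bool.false_eq_true, ih hL.2]
      simp

theorem pv_filter_keep (u : Int) (L : List (Int × List Int))
    (hL : u ∉ L.map Prod.fst) :
    L.filter (fun p => !(p.1 == u)) = L := by
  rw [List.filter_eq_self]
  intro p hp
  have : p.1 ≠ u := fun e => hL (e ▸ List.mem_map_of_mem hp)
  simp [this]

theorem pv_replace_mid (done rest : List (Int × List Int)) (u : Int) (v w : List Int)
    (hd : u ∉ done.map Prod.fst) (hr : u ∉ rest.map Prod.fst) :
    (PySem.Dict.mk (done ++ (u, v) :: rest)).insert u w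
      = PySem.Dict.mk (done ++ (u, w) :: rest) := by
  have hc : (PySem.Dict.mk (done ++ (u, v) :: rest)).contains u = true := by
    simp [PySem.Dict.contains_mk]
  apply PySem.Dict.ext
  rw [PySem.Dict.items_insert_of_contains _ _ hc]
  simp only [PySem.Dict.items]
  rw [List.map_append, List.map_cons]
  rw [pv_map_keep u w done hd, pv_map_keep u w rest hr]
  simp

theorem pv_erase_mid (done rest : List (Int × List Int)) (u : Int) (v : List Int)
    (hd : u ∉ done.map Prod.fst) (hr : u ∉ rest.map Prod.fst) :
    (PySem.Dict.mk (done ++ (u, v) :: rest)).erase u = PySem.Dict.mk (done ++ rest) := by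
  apply PySem.Dict.ext
  simp only [PySem.Dict.erase]
  rw [List.filter_append, List.filter_cons]
  rw [pv_filter_keep u done hd, pv_filter_keep u rest hr]
  simp

theorem pv_keys_filter (l : List (Int × List Int)) (hnd : (l.map Prod.fst).Nodup)
    (P : List Int → Bool) :
    ((PySem.Dict.mk l).keys.filter (fun u => P ((PySem.Dict.mk l).getD u [])))
      = (l.filter (fun p => P p.2)).map Prod.fst := by
  have hk : (PySem.Dict.mk l).keys = l.map Prod.fst := by
    simp [PySem.Dict.keys]
  rw [hk, List.filter_map]
  congr 1
  apply List.filter_congr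
  intro p hp
  have : (PySem.Dict.mk l).getD p.1 [] = p.2 := by
    apply PySem.Dict.getD_of_mem_items
    · exact hp
    · simpa [PySem.Dict.keys] using hnd
  simp [Function.comp, this]

-- A's loop over the keys of the still-unprocessed part `pending`, after a processed prefix `done`
theorem pv_lemA (pending : List (Int × List Int)) :
    ∀ (done : List (Int × List Int)) (lg sm : Int),
    ((done ++ pending).map Prod.fst).Nodup →
    (pending.map Prod.fst).foldl pvStepA (PySem.Dict.mk (done ++ pending), lg, sm)
      = (PySem.Dict.mk (done ++ (pending.map pvG).filter (fun p => !decide (p.2.length < 10))),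
         lg + ((pending.filter (fun p => decide (10 < p.2.length))).length : Int),
         sm + ((pending.filter (fun p => decide (p.2.length < 10))).length : Int)) := by
  induction pending with
  | nil => intro done lg sm _; simp
  | cons p rest ih =>
      obtain ⟨u, v⟩ := p
      intro done lg sm hnd0
      have hnd : (done.map Prod.fst ++ u :: rest.map Prod.fst).Nodup := by simpa using hnd0
      rw [List.nodup_append] at hnd
      obtain ⟨h1, h2, h3⟩ := hnd
      have hd : u ∉ done.map Prod.fst := fun hu => h3 u hu u (List.mem_cons_self) rfl
      have hr : u ∉ rest.map Prod.fst := (List.nodup_cons.mp h2).1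
      have hget : (PySem.Dict.mk (done ++ (u, v) :: rest)).getD u [] = v :=
        pv_getD_mid done rest u v hd
      simp only [List.map_cons, List.foldl_cons, pvStepA, hget]
      by_cases h10 : v.length = 10
      · rw [if_pos h10]
        have e1 : done ++ (u, v) :: rest = (done ++ [(u, v)]) ++ rest := by simp
        rw [e1, ih ((done ++ [(u, v)])) lg sm (by simpa using hnd0)]
        simp [pvG, h10, List.filter_cons]
      · rw [if_neg h10]
        by_cases h11 : 10 < v.length
        · rw [if_pos h11]
          rw [pv_replace_mid done rest u v (v.take 10) hd hr]
          have e1 : done ++ (u, v.take 10) :: rest = (done ++ [(u, v.take 10)]) ++ rest := by simp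
          have hnd' : (((done ++ [(u, v.take 10)]) ++ rest).map Prod.fst).Nodup := by
            simpa using hnd0
          rw [e1, ih ((done ++ [(u, v.take 10)])) (lg + 1) sm hnd']
          have hkeep : (v.take 10).length = 10 := by
            rw [List.length_take]; omega
          have hnl : ¬ v.length < 10 := by omega
          simp only [pvG, List.map_cons, List.filter_cons]
          simp [h11, hnl, hkeep, Prod.ext_iff, List.append_assoc] <;> omega
        · rw [if_neg h11]
          have hlt : v.length < 10 := by omega
          rw [pv_erase_mid done rest u v hd hr]
          have hnd'' : ((done ++ rest).map Prod.fst).Nodup := by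
            rw [List.map_append, List.nodup_append]
            exact ⟨h1, (List.nodup_cons.mp h2).2,
              fun a ha b hb hab => h3 a ha b (List.mem_cons.mpr (Or.inr hb)) hab⟩
          rw [ih done lg (sm + 1) hnd'']
          simp only [pvG, List.map_cons, List.filter_cons]
          simp [hlt, Nat.lt_asymm hlt, Prod.ext_iff] <;> omega

-- B's truncation pass
theorem pv_lemB1 (pending : List (Int × List Int)) :
    ∀ (done : List (Int × List Int)),
    ((done ++ pending).map Prod.fst).Nodup →
    ((pending.filter (fun p => decide (10 < p.2.length))).map Prod.fst).foldl
        (fun d' u => d'.insert u ((d'.getD u []).take 10)) (PySem.Dict.mk (done ++ pending))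
      = PySem.Dict.mk (done ++ pending.map pvG) := by
  induction pending with
  | nil => intro done _; simp
  | cons p rest ih =>
      obtain ⟨u, v⟩ := p
      intro done hnd0
      have hnd : (done.map Prod.fst ++ u :: rest.map Prod.fst).Nodup := by simpa using hnd0
      rw [List.nodup_append] at hnd
      obtain ⟨h1, h2, h3⟩ := hnd
      have hd : u ∉ done.map Prod.fst := fun hu => h3 u hu u (List.mem_cons_self) rfl
      have hr : u ∉ rest.map Prod.fst := (List.nodup_cons.mp h2).1
      by_cases h11 : 10 < v.length
      · have hget : (PySem.Dict.mk (done ++ (u, v) :: rest)).getD u [] = v :=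
          pv_getD_mid done rest u v hd
        simp only [List.filter_cons, h11, decide_true, if_pos, List.map_cons, List.foldl_cons,
          hget]
        rw [pv_replace_mid done rest u v (v.take 10) hd hr]
        have e1 : done ++ (u, v.take 10) :: rest = (done ++ [(u, v.take 10)]) ++ rest := by simp
        rw [e1, ih ((done ++ [(u, v.take 10)])) (by simpa using hnd0)]
        simp [pvG, h11]
      · have e1 : done ++ (u, v) :: rest = (done ++ [(u, v)]) ++ rest := by simp
        simp only [List.filter_cons, h11, decide_false]
        rw [if_neg (by simp)]
        rw [e1, ih ((done ++ [(u, v)])) (by simpa using hnd0)]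
        simp [pvG, h11]

-- B's deletion pass
theorem pv_lemB2 (pending : List (Int × List Int)) :
    ∀ (done : List (Int × List Int)),
    ((done ++ pending).map Prod.fst).Nodup →
    ((pending.filter (fun p => decide (p.2.length < 10))).map Prod.fst).foldl
        (fun d' u => d'.erase u) (PySem.Dict.mk (done ++ pending))
      = PySem.Dict.mk (done ++ pending.filter (fun p => !decide (p.2.length < 10))) := by
  induction pending with
  | nil => intro done _; simp
  | cons p rest ih =>
      obtain ⟨u, v⟩ := p
      intro done hnd0
      have hnd : (done.map Prod.fst ++ u :: rest.map Prod.fst).Nodup := by simpa using hnd0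
      rw [List.nodup_append] at hnd
      obtain ⟨h1, h2, h3⟩ := hnd
      have hd : u ∉ done.map Prod.fst := fun hu => h3 u hu u (List.mem_cons_self) rfl
      have hr : u ∉ rest.map Prod.fst := (List.nodup_cons.mp h2).1
      by_cases hlt : v.length < 10
      · simp only [List.filter_cons, hlt, decide_true, if_pos, List.map_cons, List.foldl_cons]
        rw [pv_erase_mid done rest u v hd hr]
        have hnd'' : ((done ++ rest).map Prod.fst).Nodup := by
          rw [List.map_append, List.nodup_append]
          exact ⟨h1, (List.nodup_cons.mp h2).2,
            fun a ha b hb hab => h3 a ha b (List.mem_cons.mpr (Or.inr hb)) hab⟩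
        rw [ih done hnd'']
        simp [hlt]
      · have e1 : done ++ (u, v) :: rest = (done ++ [(u, v)]) ++ rest := by simp
        simp only [List.filter_cons, hlt, decide_false]
        rw [if_neg (by simp)]
        rw [e1, ih ((done ++ [(u, v)])) (by simpa using hnd0)]
        simp [hlt]

theorem pv_fst_pvG (p : Int × List Int) : (pvG p).1 = p.1 := by
  unfold pvG; split <;> rfl

theorem pv_short_pvG (p : Int × List Int) :
    decide ((pvG p).2.length < 10) = decide (p.2.length < 10) := by
  unfold pvG
  by_cases h : 10 < p.2.length
  · rw [if_pos h]
    simp only [List.length_take, decide_eq_decide]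
    omega
  · rw [if_neg h]

theorem cleaning_user_itemList_spec' (ui_dict : List (Int × List Int)) (topk : Int) :
    cleaning_user_itemList ui_dict topk = cleaning_user_itemList_alt ui_dict topk := by
  simp only [cleaning_user_itemList, cleaning_user_itemList_alt]
  have hdm : PySem.Dict.ofList ui_dict
      = PySem.Dict.mk (PySem.Dict.ofList ui_dict).items := rfl
  rw [hdm]
  set l := (PySem.Dict.ofList ui_dict).items with hl
  have hnd : (l.map Prod.fst).Nodup := by
    have := PySem.Dict.nodup_keys_ofList (ps := ui_dict)
    simpa [PySem.Dict.keys, hl] using this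
  -- A side
  have hA := pv_lemA l [] 0 0 (by simpa using hnd)
  simp only [List.nil_append] at hA
  have hk : (PySem.Dict.mk l).keys = l.map Prod.fst := by simp [PySem.Dict.keys]
  rw [pv_keys_filter l hnd (fun w => decide (10 < w.length)),
      pv_keys_filter l hnd (fun w => decide (w.length < 10))]
  rw [hk, hA]
  -- truncation pass
  have hB1 := pv_lemB1 l [] (by simpa using hnd)
  simp only [List.nil_append] at hB1
  rw [hB1]
  -- the delete-pass key list, re-expressed over the truncated entries
  have hkeys2 : ((l.map pvG).filter (fun p => decide (p.2.length < 10))).map Prod.fst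
      = (l.filter (fun p => decide (p.2.length < 10))).map Prod.fst := by
    rw [List.filter_map, List.map_map]
    have h1 : ((fun p => decide (p.2.length < 10)) ∘ pvG)
        = (fun p : Int × List Int => decide (p.2.length < 10)) := by
      funext p; exact pv_short_pvG p
    have h2 : (Prod.fst ∘ pvG) = (Prod.fst : Int × List Int → Int) := by
      funext p; exact pv_fst_pvG p
    rw [h1, h2]
  have hndG : (((l.map pvG)).map Prod.fst).Nodup := by
    rw [List.map_map]
    have h2 : (Prod.fst ∘ pvG) = (Prod.fst : Int × List Int → Int) := by
      funext p; exact pv_fst_pvG p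
    rw [h2]; exact hnd
  have hB2 := pv_lemB2 (l.map pvG) [] (by simpa using hndG)
  simp only [List.nil_append] at hB2
  rw [← hkeys2, hB2]
  have hlen := congrArg List.length hkeys2
  simp only [List.length_map] at hlen
  simp [List.length_map, hlen]

-- ===== VERDICT (by name: the statement is the Claim_ definition above) =====
theorem cleaning_user_itemList_spec : Claim_equal_cleaning_user_itemList := by
  intro ui_dict topk _
  exact cleaning_user_itemList_spec' ui_dict topk
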